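-- pv_equiv track=rewrite | github.com/Oslomayor/Python-Review | 出现1次的数字的和.py | new_sum2
-- ===== SOURCE A (Python) =====
-- def new_sum2(nums):
--     buffer=[]
--     s = 0
--     for num in nums:
--         if num in buffer:
--             buffer.remove(num)
--         else:
--             buffer.append(num)
--     return sum(buffer)
-- ===== SOURCE B (Python) =====
-- def new_sum2(nums):
--     counts = {}
--     for num in nums:
--         counts[num] = counts.get(num, 0) + 1
--     return sum(k for k, c in counts.items() if c % 2 == 1)
-- ===== Notes on version B (the rewrite author's own statement) =====
-- stated objective: faster
-- what changed: Replaces A's online membership-toggle list (linear scan plus list.remove per element) with a one-pass hash-count table followed by summing the keys with odd count.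
import Mathlib
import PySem

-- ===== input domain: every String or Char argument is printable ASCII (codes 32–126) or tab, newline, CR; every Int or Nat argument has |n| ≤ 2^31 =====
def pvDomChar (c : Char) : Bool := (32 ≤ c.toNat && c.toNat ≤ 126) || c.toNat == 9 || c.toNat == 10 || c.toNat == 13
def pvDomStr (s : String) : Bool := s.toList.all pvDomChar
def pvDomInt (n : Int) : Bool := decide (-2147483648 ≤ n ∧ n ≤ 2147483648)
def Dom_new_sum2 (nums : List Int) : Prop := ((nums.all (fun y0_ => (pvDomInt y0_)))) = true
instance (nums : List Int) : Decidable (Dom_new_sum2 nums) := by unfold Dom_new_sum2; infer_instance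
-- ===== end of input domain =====

-- B replaces A's quadratic membership-toggle buffer with a linear count-table pass
-- followed by summing the keys with odd count (objective: faster).


-- ===== PORT A =====
-- 'buffer.remove(num)' is guarded by 'num in buffer', so it removes the first
-- occurrence, which is List.erase (exact here since membership is established).
def new_sum2 (nums : List Int) : Int :=
  (nums.foldl
    (fun buffer num => if num ∈ buffer then buffer.erase num else buffer ++ [num])
    []).sum

-- ===== PORT B =====
def new_sum2_alt (nums : List Int) : Int :=
  let counts := nums.foldl (fun d x => d.insert x (d.getD x 0 + 1)) PySem.Dict.empty
  ((counts.items.filter (fun p => PySem.Int.mod p.2 2 == 1)).map (·.1)).sum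

-- ===== PRECONDITION & SPEC =====
def Spec_new_sum2 (nums : List Int) (out : Int) : Prop := out = new_sum2_alt nums
instance (nums : List Int) (out : Int) : Decidable (Spec_new_sum2 nums out) := by unfold Spec_new_sum2; infer_instance

-- ===== CLAIM (what is proved, stated in full; the proofs are below) =====
def Claim_equal_new_sum2 : Prop := ∀ (nums : List Int), Dom_new_sum2 nums → Spec_new_sum2 nums (new_sum2 nums)

-- ===== LEMMAS AND PROOFS =====

def pvStepA (buffer : List Int) (num : Int) : List Int :=
  if num ∈ buffer then buffer.erase num else buffer ++ [num]

lemma pvStepA_nodup (buf : List Int) (a : Int) (h : buf.Nodup) : (pvStepA buf a).Nodup := by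
  unfold pvStepA
  split_ifs with hm
  · exact h.erase a
  · refine List.Nodup.append h (List.nodup_singleton a) ?_
    intro x hx hxa
    rw [List.mem_singleton] at hxa
    exact hm (hxa ▸ hx)

lemma pvFoldA_nodup (l : List Int) (buf : List Int) (h : buf.Nodup) :
    (l.foldl pvStepA buf).Nodup := by
  induction l generalizing buf with
  | nil => simpa using h
  | cons a t ih => exact ih _ (pvStepA_nodup buf a h)

lemma pvStepA_mem (buf : List Int) (a x : Int) (h : buf.Nodup) :
    x ∈ pvStepA buf a ↔ ((x ∈ buf) ↔ ¬ x = a) := by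
  unfold pvStepA
  split_ifs with hm
  · rw [h.mem_erase_iff]
    by_cases hxa : x = a
    · subst hxa; simp [hm]
    · simp [hxa]
  · by_cases hxa : x = a
    · subst hxa; simp [hm]
    · simp [hxa]

lemma pvFoldA_mem (l : List Int) (buf : List Int) (x : Int) (h : buf.Nodup) :
    (x ∈ l.foldl pvStepA buf ↔ ((x ∈ buf) ↔ l.count x % 2 = 0)) := by
  induction l generalizing buf with
  | nil => simp
  | cons a t ih =>
    rw [List.foldl_cons, ih _ (pvStepA_nodup buf a h), pvStepA_mem buf a x h]
    by_cases hxa : x = a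
    · subst hxa
      rw [List.count_cons_self]
      by_cases hx : x ∈ buf <;> simp [hx] <;> omega
    · have hax : ¬a = x := fun he => hxa he.symm
      simp [hxa, hax]

def pvOddList (nums : List Int) : List Int :=
  (PySem.Set.ofList nums).filter (fun k => nums.count k % 2 = 1)

lemma pvOddList_nodup (nums : List Int) : (pvOddList nums).Nodup :=
  (PySem.Set.nodup_ofList nums).filter _

lemma pvOddList_mem (nums : List Int) (x : Int) :
    x ∈ pvOddList nums ↔ (x ∈ nums ∧ nums.count x % 2 = 1) := by
  unfold pvOddList
  simp [List.mem_filter, PySem.Set.mem_ofList]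

lemma pvA_perm (nums : List Int) :
    (nums.foldl pvStepA []).Perm (pvOddList nums) := by
  rw [List.perm_ext_iff_of_nodup (pvFoldA_nodup nums [] List.nodup_nil) (pvOddList_nodup nums)]
  intro x
  rw [pvFoldA_mem nums [] x List.nodup_nil, pvOddList_mem]
  simp only [List.not_mem_nil, false_iff]
  constructor
  · intro hne
    exact ⟨List.count_pos_iff.mp (by omega), by omega⟩
  · rintro ⟨_, hodd⟩
    omega

lemma pvB_list (nums : List Int) :
    ((((nums.foldl (fun d x => d.insert x (d.getD x 0 + 1)) PySem.Dict.empty).items.filter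
        (fun p => PySem.Int.mod p.2 2 == 1)).map (·.1))) = pvOddList nums := by
  rw [PySem.Dict.foldl_insert_getD_add_one_eq_counter, PySem.Dict.items_counter,
      List.filter_map, List.map_map]
  unfold pvOddList
  have hpred : ∀ k ∈ PySem.Set.ofList nums,
      ((fun p : Int × Int => PySem.Int.mod p.2 2 == 1) ∘ fun k => (k, (nums.count k : Int))) k
        = (fun k => decide (nums.count k % 2 = 1)) k := by
    intro k _
    simp only [Function.comp_def]
    have hmod : PySem.Int.mod ((nums.count k : Int)) 2 = ((nums.count k % 2 : Nat) : Int) := by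
      exact_mod_cast PySem.Int.mod_natCast (nums.count k) 2
    rw [hmod]
    rcases Nat.mod_two_eq_zero_or_one (nums.count k) with h2 | h2 <;> rw [h2] <;> decide
  rw [List.filter_congr hpred]
  simp only [Function.comp_def]
  exact List.map_id' _

-- ===== VERDICT (by name: the statement is the Claim_ definition above) =====
theorem new_sum2_spec : Claim_equal_new_sum2 := by
  intro nums _
  show new_sum2 nums = new_sum2_alt nums
  have hB : new_sum2_alt nums = (pvOddList nums).sum := congrArg List.sum (pvB_list nums)
  have hA : new_sum2 nums = (nums.foldl pvStepA []).sum := rfl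
  rw [hA, hB]
  exact (pvA_perm nums).sum_eq
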